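-- pv_equiv track=rewrite | github.com/Fineliner4/rents-2026 | script_permits_2012_2025.py | pick_units_sheet
-- ===== SOURCE A (Python) =====
-- def pick_units_sheet(sheet_names):
--     """
--     Elige la hoja correcta:
--     - Prioriza hojas que contengan "units"
--     - Evita "value"
--     """
--     candidates = [s for s in sheet_names if ("unit" in s.lower() and "value" not in s.lower())]
--     if candidates:
--         return candidates[0]
--     candidates = [s for s in sheet_names if ("unit" in s.lower())]
--     if candidates:
--         return candidates[0]
--     return None
-- ===== SOURCE B (Python) =====
-- def pick_units_sheet(sheet_names):
--     """One pass: track first 'unit' sheet without 'value' and first 'unit' sheet overall."""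
--     first_pref = None
--     first_any = None
--     for s in sheet_names:
--         low = s.lower()
--         if "unit" in low:
--             if first_any is None:
--                 first_any = s
--             if "value" not in low and first_pref is None:
--                 first_pref = s
--     return first_pref if first_pref is not None else first_any
-- ===== Notes on version B (the rewrite author's own statement) =====
-- stated objective: simpler
-- what changed: Replaces A's two list-comprehension scans (each lowercasing every name and building a full candidate list) with a single pass that lowercases each name once and keeps two first-match sentinels, so no intermediate lists and one lowering per name.
import Mathlib
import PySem

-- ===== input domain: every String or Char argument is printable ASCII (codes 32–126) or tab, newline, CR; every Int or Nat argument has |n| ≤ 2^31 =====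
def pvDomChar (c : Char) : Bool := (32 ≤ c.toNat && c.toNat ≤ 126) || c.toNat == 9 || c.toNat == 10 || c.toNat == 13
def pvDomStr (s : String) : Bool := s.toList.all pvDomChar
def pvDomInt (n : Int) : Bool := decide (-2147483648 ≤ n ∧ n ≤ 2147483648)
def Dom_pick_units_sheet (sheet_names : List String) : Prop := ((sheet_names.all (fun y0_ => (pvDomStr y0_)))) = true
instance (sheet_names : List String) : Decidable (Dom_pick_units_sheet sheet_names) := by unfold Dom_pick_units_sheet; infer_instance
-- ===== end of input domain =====

-- B replaces A's two filtering passes by one loop keeping two first-match sentinels (objective: simpler).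
-- ===== PORT A =====
def pick_units_sheet (sheet_names : List String) : Option String :=
  let candidates := sheet_names.filter
    (fun s => PySem.Str.isIn "unit" (PySem.Str.lower s) && !(PySem.Str.isIn "value" (PySem.Str.lower s)))
  match candidates with
  | c :: _ => some c
  | [] =>
    let candidates2 := sheet_names.filter (fun s => PySem.Str.isIn "unit" (PySem.Str.lower s))
    match candidates2 with
    | c :: _ => some c
    | [] => none

-- ===== PORT B =====
def pickLoop : List String → Option String → Option String → Option String × Option String
  | [], first_pref, first_any => (first_pref, first_any)
  | s :: rest, first_pref, first_any =>
    let low := PySem.Str.lower s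
    if PySem.Str.isIn "unit" low then
      let first_any' := if first_any.isNone then some s else first_any
      let first_pref' :=
        if !(PySem.Str.isIn "value" low) && first_pref.isNone then some s else first_pref
      pickLoop rest first_pref' first_any'
    else
      pickLoop rest first_pref first_any

def pick_units_sheet_alt (sheet_names : List String) : Option String :=
  match pickLoop sheet_names none none with
  | (some p, _) => some p
  | (none, a) => a

-- ===== PRECONDITION & SPEC =====
def Spec_pick_units_sheet (sheet_names : List String) (out : Option String) : Prop := out = pick_units_sheet_alt sheet_names
instance (sheet_names : List String) (out : Option String) : Decidable (Spec_pick_units_sheet sheet_names out) := by unfold Spec_pick_units_sheet; infer_instance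

-- ===== CLAIM (what is proved, stated in full; the proofs are below) =====
def Claim_equal_pick_units_sheet : Prop := ∀ (sheet_names : List String), Dom_pick_units_sheet sheet_names → Spec_pick_units_sheet sheet_names (pick_units_sheet sheet_names)

-- ===== LEMMAS AND PROOFS =====
lemma pickLoop_eq (xs : List String) (p a : Option String) :
    pickLoop xs p a =
      (p.or ((xs.filter (fun s => PySem.Str.isIn "unit" (PySem.Str.lower s)
                && !(PySem.Str.isIn "value" (PySem.Str.lower s)))).head?),
       a.or ((xs.filter (fun s => PySem.Str.isIn "unit" (PySem.Str.lower s))).head?)) := by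
  induction xs generalizing p a with
  | nil => simp [pickLoop]
  | cons s rest ih =>
    simp only [pickLoop, List.filter_cons]
    by_cases hu : PySem.Chars.isIn ['u','n','i','t'] (PySem.Chars.lower s.toList) = true
    · by_cases hv : PySem.Chars.isIn ['v','a','l','u','e'] (PySem.Chars.lower s.toList) = true
      · cases a <;> simp [hu, hv, ih]
      · cases p <;> cases a <;> simp [hu, hv, ih]
    · simp [Bool.not_eq_true] at hu
      simp [hu, ih]

-- ===== VERDICT (by name: the statement is the Claim_ definition above) =====
theorem pick_units_sheet_spec : Claim_equal_pick_units_sheet := by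
  intro xs _
  show pick_units_sheet xs = pick_units_sheet_alt xs
  unfold pick_units_sheet pick_units_sheet_alt
  rw [pickLoop_eq]
  cases h1 : xs.filter (fun s => PySem.Str.isIn "unit" (PySem.Str.lower s)
      && !(PySem.Str.isIn "value" (PySem.Str.lower s))) with
  | cons c t => simp [h1]
  | nil =>
    cases h2 : xs.filter (fun s => PySem.Str.isIn "unit" (PySem.Str.lower s)) with
    | cons c t => simp only [h1]; simp [h2]
    | nil => simp only [h1]; simp [h2]
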